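-- pv_equiv track=rewrite | github.com/saba300/GOA-homeworks-Group-11 | Day 032/Homework/task1.py | find_outlier
-- ===== SOURCE A (Python) =====
-- def find_outlier(integers):
--     odd=0
--     even=0
--     x=0
--     for i in integers:
--         if i%2==0:
--             even+=1
--         else:
--             odd+=1
--     if even==1:
--         for i in integers:
--             if i%2==0:
--                 return i
--     else:
--         for i in integers:
--             if i%2==1:
--                 return i
-- ===== SOURCE B (Python) =====
-- def find_outlier(integers):
--     odds = []
--     evens = []
--     for i in integers:
--         if i % 2 == 0:
--             evens.append(i)
--         else:
--             odds.append(i)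
--     if len(evens) == 1:
--         return evens[0]
--     if odds:
--         return odds[0]
--     return None
-- ===== Notes on version B (the rewrite author's own statement) =====
-- stated objective: simpler
-- what changed: Replaces A's counting pass followed by a second scan-for-first-match pass with a single partition pass into odds/evens lists, then selects the answer by list length.
-- outside the precondition, e.g. on find_outlier([2, 4]): A returns None, B returns None
import Mathlib
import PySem

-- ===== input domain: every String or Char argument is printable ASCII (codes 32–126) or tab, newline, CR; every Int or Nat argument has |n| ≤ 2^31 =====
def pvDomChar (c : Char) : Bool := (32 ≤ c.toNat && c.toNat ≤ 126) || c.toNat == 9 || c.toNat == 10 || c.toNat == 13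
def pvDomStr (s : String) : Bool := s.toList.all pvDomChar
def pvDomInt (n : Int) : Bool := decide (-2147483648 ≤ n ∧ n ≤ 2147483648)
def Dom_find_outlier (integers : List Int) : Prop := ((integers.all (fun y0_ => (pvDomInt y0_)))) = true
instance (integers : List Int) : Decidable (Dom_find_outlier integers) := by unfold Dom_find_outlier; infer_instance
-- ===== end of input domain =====

-- B replaces A's count-then-rescan structure with a single partition into odds/evens
-- selected by length (objective: simpler); return-value equivalence on Pre_ (where A
-- returns an int rather than falling through to None).

-- ===== PORT A =====
-- counting loop: fold carrying (odd, even); the two early-return scans become find?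
def find_outlier (integers : List Int) : Int :=
  let c := integers.foldl (fun (oe : Int × Int) i =>
    if i % 2 = 0 then (oe.1, oe.2 + 1) else (oe.1 + 1, oe.2)) (0, 0)
  if c.2 = 1 then
    ((integers.find? (fun i => i % 2 == 0)).getD 0)
  else
    ((integers.find? (fun i => i % 2 == 1)).getD 0)

-- ===== PORT B =====
-- one partition pass appending each element to odds or evens, then select by length
def find_outlier_alt (integers : List Int) : Int :=
  let p := integers.foldl (fun (oe : List Int × List Int) i =>
    if i % 2 = 0 then (oe.1, oe.2 ++ [i]) else (oe.1 ++ [i], oe.2)) ([], [])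
  if p.2.length = 1 then p.2.headD 0
  else p.1.headD 0

-- ===== PRECONDITION & SPEC =====
-- Pre_ excludes exactly the inputs on which Python A falls through and returns None
-- (no int of the declared type): lists whose even count ≠ 1 and which contain no odd.
def Pre_find_outlier (integers : List Int) : Prop :=
  integers.countP (fun i => i % 2 == 0) = 1 ∨ ∃ i ∈ integers, i % 2 = 1
instance (integers : List Int) : Decidable (Pre_find_outlier integers) := by
  unfold Pre_find_outlier; infer_instance
def pvWitness_find_outlier : List Int := [3, 5, 4]
def Spec_find_outlier (integers : List Int) (out : Int) : Prop := out = find_outlier_alt integers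
instance (integers : List Int) (out : Int) : Decidable (Spec_find_outlier integers out) := by unfold Spec_find_outlier; infer_instance

-- ===== CLAIM (what is proved, stated in full; the proofs are below) =====
def Claim_equal_find_outlier : Prop := ∀ (integers : List Int), Dom_find_outlier integers → Pre_find_outlier integers → Spec_find_outlier integers (find_outlier integers)

-- ===== LEMMAS AND PROOFS =====
-- A's counting fold computes (countP odd, countP even)
theorem pv_count_fold (l : List Int) (o e : Int) :
    l.foldl (fun (oe : Int × Int) i =>
      if i % 2 = 0 then (oe.1, oe.2 + 1) else (oe.1 + 1, oe.2)) (o, e)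
    = (o + l.countP (fun i => i % 2 == 1), e + l.countP (fun i => i % 2 == 0)) := by
  induction l generalizing o e with
  | nil => simp [List.countP]
  | cons a t ih =>
    by_cases h : a % 2 = 0
    · have h1 : ¬ a % 2 = 1 := by omega
      rw [List.foldl_cons, if_pos h, ih]
      simp [h, Prod.ext_iff]
      omega
    · have h1 : a % 2 = 1 := by omega
      rw [List.foldl_cons, if_neg h, ih]
      simp [h1, Prod.ext_iff]
      omega

-- B's partition fold computes (filter odd, filter even)
theorem pv_part_fold (l : List Int) (o e : List Int) :
    l.foldl (fun (oe : List Int × List Int) i =>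
      if i % 2 = 0 then (oe.1, oe.2 ++ [i]) else (oe.1 ++ [i], oe.2)) (o, e)
    = (o ++ l.filter (fun i => i % 2 == 1), e ++ l.filter (fun i => i % 2 == 0)) := by
  induction l generalizing o e with
  | nil => simp
  | cons a t ih =>
    by_cases h : a % 2 = 0
    · have h1 : ¬ a % 2 = 1 := by omega
      rw [List.foldl_cons, if_pos h, ih]
      simp [h]
    · have h1 : a % 2 = 1 := by omega
      rw [List.foldl_cons, if_neg h, ih]
      simp [h1]

-- first match of a scan = head of the filtered list
theorem pv_find_head (p : Int → Bool) (l : List Int) :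
    (l.find? p).getD 0 = (l.filter p).headD 0 := by
  induction l with
  | nil => rfl
  | cons a t ih =>
    rw [List.find?_cons, List.filter_cons]
    cases h : p a
    · exact ih
    · rfl

-- ===== VERDICT (by name: the statement is the Claim_ definition above) =====
theorem find_outlier_spec : Claim_equal_find_outlier := by
  intro l _ _
  unfold Spec_find_outlier find_outlier find_outlier_alt
  rw [pv_count_fold, pv_part_fold]
  simp only [List.nil_append, zero_add, pv_find_head]
  have hlen : (l.filter (fun i => i % 2 == 0)).length = l.countP (fun i => i % 2 == 0) :=
    List.countP_eq_length_filter.symm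
  by_cases h : l.countP (fun i => i % 2 == 0) = 1
  · rw [if_pos (by exact_mod_cast h), if_pos (by rw [hlen]; exact h)]
  · rw [if_neg (by intro hc; exact h (by exact_mod_cast hc)),
        if_neg (by rw [hlen]; exact h)]
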